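-- pv_equiv track=rewrite | github.com/Time0o/leetcode | 503-next-greater-element-ii.py | solution
-- ===== SOURCE A (Python) =====
-- def solution(nums: list[int]) -> list[int]:
--     res = [-1] * len(nums)
--
--     stack = nums[::-1]
--     for i in range(len(nums) - 1, -1, -1):
--         n = nums[i]
--         while stack and stack[-1] <= n:
--             stack.pop()
--         if stack:
--             res[i] = stack[-1]
--         stack.append(n)
--
--     return res
-- ===== SOURCE B (Python) =====
-- def solution(nums: list[int]) -> list[int]:
--     n = len(nums)
--     res = [-1] * n
--     stack = []
--     for i in range(2 * n):
--         x = nums[i % n]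
--         while stack and nums[stack[-1]] < x:
--             res[stack.pop()] = x
--         if i < n:
--             stack.append(i)
--     return res
-- ===== Notes on version B (the rewrite author's own statement) =====
-- stated objective: alternative
-- what changed: Replaces A's right-to-left monotonic value stack (seeded with the whole reversed list, answer read off the stack top before each push) by the canonical forward pass over the doubled index range with a stack of indices, assigning each answer at pop time.
import Mathlib
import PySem

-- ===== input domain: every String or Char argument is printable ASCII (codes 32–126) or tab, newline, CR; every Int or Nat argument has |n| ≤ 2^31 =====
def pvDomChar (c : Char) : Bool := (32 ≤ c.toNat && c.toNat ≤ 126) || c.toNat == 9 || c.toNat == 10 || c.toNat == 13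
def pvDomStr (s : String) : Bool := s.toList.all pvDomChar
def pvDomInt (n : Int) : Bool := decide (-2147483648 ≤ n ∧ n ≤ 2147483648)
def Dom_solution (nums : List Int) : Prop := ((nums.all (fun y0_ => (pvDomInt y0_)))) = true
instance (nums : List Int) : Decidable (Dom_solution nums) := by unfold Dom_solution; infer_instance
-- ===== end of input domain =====

-- B replaces A's right-to-left monotonic value stack (seeded with the reversed list) by the
-- canonical forward pass over the doubled index range with a stack of indices, assigning at pop time.

-- ===== PORT A =====
-- Python's stack (append/pop at the END) is represented top-at-HEAD throughout this file:
-- the seed stack = nums[::-1] (top = nums[0]) is therefore the list `nums` itself.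

-- `while stack and stack[-1] <= n: stack.pop()`
def popWhile (v : Int) : List Int → List Int
  | [] => []
  | x :: s => if x ≤ v then popWhile v s else x :: s

-- the loop `for i in range(len(nums)-1, -1, -1)`, building res[0..i-1];
-- res[i] starts at -1 and is overwritten iff the stack is nonempty.
def aLoop (nums : List Int) : Nat → List Int → List Int
  | 0, _ => []
  | i + 1, stack =>
    let v := nums.getD i 0          -- nums[i]; i < len nums on every call
    let s' := popWhile v stack
    let r := match s' with | [] => -1 | t :: _ => t
    aLoop nums i (v :: s') ++ [r]

def solution (nums : List Int) : List Int :=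
  aLoop nums nums.length nums

-- ===== PORT B =====
-- `while stack and nums[stack[-1]] < x: res[stack.pop()] = x` (stack top-at-head)
def bPop (nums : List Int) (x : Int) : List Int → List Int → (List Int × List Int)
  | [], res => ([], res)
  | j :: st, res =>
    if PySem.List.pyGetD nums j 0 < x then bPop nums x st (PySem.List.pySetD res j x)
    else (j :: st, res)

-- one iteration of `for i in range(2 * n)`
def bStep (nums : List Int) (p : List Int × List Int) (i : Int) : List Int × List Int :=
  let x := PySem.List.pyGetD nums (PySem.Int.mod i nums.length) 0   -- nums[i % n]
  let q := bPop nums x p.1 p.2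
  (if i < (nums.length : Int) then i :: q.1 else q.1, q.2)

def solution_alt (nums : List Int) : List Int :=
  ((PySem.List.pyRange 0 (2 * (nums.length : Int)) 1).foldl (bStep nums)
    ([], List.replicate nums.length (-1))).2

-- ===== PRECONDITION & SPEC =====
def Spec_solution (nums : List Int) (out : List Int) : Prop := out = solution_alt nums
instance (nums : List Int) (out : List Int) : Decidable (Spec_solution nums out) := by unfold Spec_solution; infer_instance

-- ===== CLAIM (what is proved, stated in full; the proofs are below) =====
def Claim_equal_solution : Prop := ∀ (nums : List Int), Dom_solution nums → Spec_solution nums (solution nums)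

-- ===== LEMMAS AND PROOFS =====

-- `nextIn v l`: the first element of l strictly greater than v, else -1
-- (the circular next-greater value both programs compute).
def nextIn (v : Int) : List Int → Int
  | [] => -1
  | x :: t => if v < x then x else nextIn v t

lemma nextIn_neg {w : Int} {l : List Int} (h : ∀ x ∈ l, ¬ w < x) : nextIn w l = -1 := by
  induction l with
  | nil => rfl
  | cons x t ih =>
    simp only [nextIn]
    rw [if_neg (h x (by simp))]
    exact ih (fun y hy => h y (by simp [hy]))

lemma nextIn_append_skip {w : Int} {l1 : List Int} (l2 : List Int)
    (h : ∀ x ∈ l1, ¬ w < x) : nextIn w (l1 ++ l2) = nextIn w l2 := by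
  induction l1 with
  | nil => rfl
  | cons x t ih =>
    simp only [List.cons_append, nextIn]
    rw [if_neg (h x (by simp))]
    exact ih (fun y hy => h y (by simp [hy]))

lemma nextIn_popWhile {v w : Int} (h : v ≤ w) (s : List Int) :
    nextIn w (popWhile v s) = nextIn w s := by
  induction s with
  | nil => rfl
  | cons x t ih =>
    simp only [popWhile]
    by_cases hx : x ≤ v
    · rw [if_pos hx, ih]
      simp only [nextIn]
      rw [if_neg (by omega)]
    · rw [if_neg hx]

lemma headVal_popWhile (v : Int) (s : List Int) :
    (match popWhile v s with | [] => -1 | t :: _ => t) = nextIn v s := by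
  induction s with
  | nil => rfl
  | cons x t ih =>
    simp only [popWhile, nextIn]
    by_cases hx : x ≤ v
    · rw [if_pos hx, if_neg (by omega)]; exact ih
    · rw [if_neg hx, if_pos (by omega)]

-- the value both programs store at position j
def specA (nums : List Int) (j : Nat) : Int :=
  nextIn (nums.getD j 0) (nums.drop (j + 1) ++ nums)

-- ===== A-side: the backward value-stack loop computes specA =====

lemma aLoop_eq (nums : List Int) : ∀ (i : Nat) (s : List Int), i ≤ nums.length →
    (∀ w, nextIn w s = nextIn w (nums.drop i ++ nums)) →
    aLoop nums i s = (List.range i).map (specA nums) := by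
  intro i
  induction i with
  | zero => intro s _ _; simp [aLoop]
  | succ i ih =>
    intro s hi hs
    have hlt : i < nums.length := by omega
    have hdrop : nums.drop i = nums.getD i 0 :: nums.drop (i + 1) := by
      rw [List.getD_eq_getElem nums 0 hlt]
      exact List.drop_eq_getElem_cons hlt
    simp only [aLoop]
    have hrec : ∀ w, nextIn w (nums.getD i 0 :: popWhile (nums.getD i 0) s)
        = nextIn w (nums.drop i ++ nums) := by
      intro w
      rw [hdrop]
      simp only [List.cons_append, nextIn]
      by_cases hw : w < nums.getD i 0
      · rw [if_pos hw, if_pos hw]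
      · rw [if_neg hw, if_neg hw, nextIn_popWhile (by omega), hs w]
    rw [ih _ (by omega) hrec, headVal_popWhile, hs, List.range_succ, List.map_append]
    simp [specA]

lemma solution_eq_spec (nums : List Int) :
    solution nums = (List.range nums.length).map (specA nums) := by
  unfold solution
  exact aLoop_eq nums nums.length nums le_rfl
    (by intro w; rw [List.drop_length]; rfl)

-- ===== B-side: the forward index-stack loop computes specA =====

-- value at a (Nat-valued Int) stack index
def vnum (nums : List Int) (j : Int) : Int := nums.getD j.toNat 0

-- value at doubled position k (k < 2n): nums[k % n]
def dv (nums : List Int) (k : Nat) : Int := nums.getD (k % nums.length) 0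

-- the values at doubled positions a, a+1, …, b-1
def seg (nums : List Int) (a b : Nat) : List Int := (List.range' a (b - a)).map (dv nums)

lemma map_getD_range' (nums : List Int) (a : Nat) :
    (List.range' a (nums.length - a)).map (fun k => nums.getD k 0) = nums.drop a := by
  apply List.ext_getElem
  · simp
  · intro m h1 h2
    simp only [List.getElem_map, List.getElem_range', List.getElem_drop, Nat.one_mul]
    have : a + m < nums.length := by
      simp at h2; omega
    rw [List.getD_eq_getElem nums 0 this]


lemma seg_split (nums : List Int) (a b c : Nat) (hab : a ≤ b) (hbc : b ≤ c) :
    seg nums a c = seg nums a b ++ seg nums b c := by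
  unfold seg
  rw [← List.map_append]
  congr 1
  have h2 : c - a = (b - a) + (c - b) := by omega
  rw [h2, ← List.range'_append]
  congr 2
  omega

lemma seg_cons (nums : List Int) (a b : Nat) (h : a < b) :
    seg nums a b = dv nums a :: seg nums (a + 1) b := by
  unfold seg
  have : b - a = (b - (a + 1)) + 1 := by omega
  rw [this, List.range'_succ, List.map_cons]

lemma seg_forall {P : Int → Prop} (nums : List Int) (a b : Nat)
    (h : ∀ k, a ≤ k → k < b → P (dv nums k)) : ∀ x ∈ seg nums a b, P x := by
  intro x hx
  rcases List.mem_map.mp hx with ⟨k, hk, rfl⟩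
  rcases List.mem_range'_1.mp hk with ⟨h1, h2⟩
  by_cases hab : a ≤ b
  · exact h k h1 (by omega)
  · omega

lemma seg_full (nums : List Int) (j : Nat) (hj : j < nums.length) :
    seg nums (j + 1) (2 * nums.length) = nums.drop (j + 1) ++ nums := by
  rw [seg_split nums (j + 1) nums.length (2 * nums.length) (by omega) (by omega)]
  congr 1
  · unfold seg
    rw [← map_getD_range' nums (j + 1)]
    apply List.map_congr_left
    intro k hk
    rcases List.mem_range'_1.mp hk with ⟨h1, h2⟩
    unfold dv
    rw [Nat.mod_eq_of_lt (by omega)]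
  · unfold seg
    have h1 : 2 * nums.length - nums.length = nums.length := by omega
    rw [h1, List.range'_eq_map_range, List.map_map]
    have h2 : ∀ m ∈ List.range nums.length,
        (dv nums ∘ (nums.length + ·)) m = nums.getD m 0 := by
      intro m hm
      simp only [Function.comp, dv]
      rw [Nat.add_mod_left]
      rw [Nat.mod_eq_of_lt (List.mem_range.mp hm)]
    rw [List.map_congr_left h2]
    have := map_getD_range' nums 0
    simpa [List.range_eq_range'] using this

lemma specA_seg (nums : List Int) (j : Nat) (hj : j < nums.length) :
    specA nums j = nextIn (nums.getD j 0) (seg nums (j + 1) (2 * nums.length)) := by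
  rw [seg_full nums j hj]; rfl

lemma specA_pop (nums : List Int) (j i : Nat) (hj : j < nums.length) (hji : j < i)
    (hi : i < 2 * nums.length)
    (H : ∀ k, j < k → k < i → ¬ nums.getD j 0 < dv nums k)
    (hx : nums.getD j 0 < dv nums i) :
    specA nums j = dv nums i := by
  rw [specA_seg nums j hj,
      seg_split nums (j + 1) i (2 * nums.length) (by omega) (by omega),
      seg_cons nums i (2 * nums.length) (by omega),
      nextIn_append_skip _ (seg_forall nums (j + 1) i (fun k h1 h2 => H k (by omega) h2))]
  simp only [nextIn]
  rw [if_pos hx]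

lemma specA_none (nums : List Int) (j : Nat) (hj : j < nums.length)
    (H : ∀ k, j < k → k < 2 * nums.length → ¬ nums.getD j 0 < dv nums k) :
    specA nums j = -1 := by
  rw [specA_seg nums j hj]
  exact nextIn_neg (seg_forall nums (j + 1) (2 * nums.length)
    (fun k h1 h2 => H k (by omega) h2))

-- the loop invariant after i of the 2n iterations
def BInv (nums : List Int) (i : Nat) (st res : List Int) : Prop :=
  res.length = nums.length ∧
  st.Pairwise (fun a b => b < a ∧ vnum nums a ≤ vnum nums b) ∧
  (∀ j ∈ st, 0 ≤ j ∧ j < ((min i nums.length : Nat) : Int)) ∧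
  (∀ j ∈ st, ∀ k : Nat, j < (k : Int) → k < i → ¬ vnum nums j < dv nums k) ∧
  (∀ jn : Nat, jn < nums.length →
     (((jn : Int) ∈ st ∨ i ≤ jn) → res.getD jn 0 = -1) ∧
     (((jn : Int) ∉ st ∧ jn < i) → res.getD jn 0 = specA nums jn))

lemma pyGetD_vnum (nums : List Int) (j : Int) (h0 : 0 ≤ j) (h1 : j.toNat < nums.length) :
    PySem.List.pyGetD nums j 0 = vnum nums j := by
  rw [PySem.List.pyGetD_eq_getElem nums (i := j) 0 h0 (by omega), vnum,
      List.getD_eq_getElem nums 0 h1]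

lemma bPop_aux (nums : List Int) (i : Nat) (hi : i < 2 * nums.length) :
    ∀ st res,
      st.Pairwise (fun a b => b < a ∧ vnum nums a ≤ vnum nums b) →
      (∀ j ∈ st, 0 ≤ j ∧ j < ((min i nums.length : Nat) : Int)) →
      (∀ j ∈ st, ∀ k : Nat, j < (k : Int) → k < i → ¬ vnum nums j < dv nums k) →
      res.length = nums.length →
      (∀ jn : Nat, jn < nums.length →
        (((jn : Int) ∈ st ∨ i ≤ jn) → res.getD jn 0 = -1) ∧
        (((jn : Int) ∉ st ∧ jn < i) → res.getD jn 0 = specA nums jn)) →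
      (bPop nums (dv nums i) st res).1.Sublist st ∧
      (∀ j ∈ (bPop nums (dv nums i) st res).1, ¬ vnum nums j < dv nums i) ∧
      (bPop nums (dv nums i) st res).2.length = nums.length ∧
      (∀ jn : Nat, jn < nums.length →
        (((jn : Int) ∈ (bPop nums (dv nums i) st res).1 ∨ i ≤ jn) →
          (bPop nums (dv nums i) st res).2.getD jn 0 = -1) ∧
        (((jn : Int) ∉ (bPop nums (dv nums i) st res).1 ∧ jn < i) →
          (bPop nums (dv nums i) st res).2.getD jn 0 = specA nums jn)) := by
  intro st
  induction st with
  | nil =>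
    intro res _ _ _ hlen hres
    refine ⟨List.Sublist.refl _, by simp [bPop], hlen, ?_⟩
    intro jn hjn
    simp only [bPop]
    refine ⟨fun h => ?_, fun h => ?_⟩
    · exact (hres jn hjn).1 (by simpa using h)
    · exact (hres jn hjn).2 (by simpa using h)
  | cons j st ih =>
    intro res hpw hb h3 hlen hres
    have hj0 : 0 ≤ j := (hb j (by simp)).1
    have hjmin : j < ((min i nums.length : Nat) : Int) := (hb j (by simp)).2
    have hjn : j.toNat < nums.length := by omega
    have hji : j.toNat < i := by omega
    have hjcast : ((j.toNat : Nat) : Int) = j := Int.toNat_of_nonneg hj0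
    have hpwc := List.pairwise_cons.mp hpw
    simp only [bPop, pyGetD_vnum nums j hj0 hjn]
    by_cases hpop : vnum nums j < dv nums i
    · rw [if_pos hpop]
      have hset : PySem.List.pySetD res j (dv nums i) = res.set j.toNat (dv nums i) :=
        PySem.List.pySetD_of_nonneg res (dv nums i) hj0
      have hres1len : (PySem.List.pySetD res j (dv nums i)).length = nums.length := by
        rw [hset, List.length_set, hlen]
      have hres1 : ∀ jn : Nat, jn < nums.length →
          (((jn : Int) ∈ st ∨ i ≤ jn) →
            (PySem.List.pySetD res j (dv nums i)).getD jn 0 = -1) ∧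
          (((jn : Int) ∉ st ∧ jn < i) →
            (PySem.List.pySetD res j (dv nums i)).getD jn 0 = specA nums jn) := by
        intro jn hjnlt
        have hget : ∀ d : Int, (PySem.List.pySetD res j (dv nums i)).getD jn d =
            if j.toNat = jn then dv nums i else res.getD jn d := by
          intro d
          rw [hset, List.getD_eq_getElem _ d (by rw [List.length_set]; omega), List.getElem_set]
          split_ifs with hh
          · rfl
          · rw [List.getD_eq_getElem res d (by omega)]
        constructor
        · intro hcase
          have hne : j.toNat ≠ jn := by
            rcases hcase with hmem | hile
            · have := (hpwc.1 _ hmem).1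
              omega
            · omega
          rw [hget 0, if_neg hne]
          refine (hres jn hjnlt).1 ?_
          rcases hcase with hmem | hile
          · exact Or.inl (List.mem_cons_of_mem _ hmem)
          · exact Or.inr hile
        · intro ⟨hnmem, hjni⟩
          by_cases heq : j.toNat = jn
          · rw [hget 0, if_pos heq]
            subst heq
            refine (specA_pop nums j.toNat i hjn hji hi ?_ ?_).symm
            · intro k hk1 hk2
              have := h3 j (by simp) k (by omega) hk2
              simpa [vnum] using this
            · simpa [vnum] using hpop
          · rw [hget 0, if_neg heq]
            refine (hres jn hjnlt).2 ⟨?_, hjni⟩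
            intro hmem
            rcases List.mem_cons.mp hmem with hh | hh
            · omega
            · exact hnmem hh
      have := ih (PySem.List.pySetD res j (dv nums i)) hpwc.2
        (fun b hb' => hb b (List.mem_cons_of_mem _ hb'))
        (fun b hb' => h3 b (List.mem_cons_of_mem _ hb'))
        hres1len hres1
      exact ⟨this.1.trans (List.sublist_cons_self _ _), this.2.1, this.2.2.1, this.2.2.2⟩
    · rw [if_neg hpop]
      refine ⟨List.Sublist.refl _, ?_, hlen, ?_⟩
      · intro b hbmem
        rcases List.mem_cons.mp hbmem with rfl | hh
        · exact hpop
        · have hv := (hpwc.1 _ hh).2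
          intro hcon
          exact hpop (by omega)
      · intro jn hjnlt
        exact hres jn hjnlt

lemma step_inv (nums : List Int) (i : Nat) (hi : i < 2 * nums.length)
    (st res : List Int) (h : BInv nums i st res) :
    BInv nums (i + 1) (bStep nums (st, res) (i : Int)).1 (bStep nums (st, res) (i : Int)).2 := by
  obtain ⟨hlen, hpw, hb, h3, hres⟩ := h
  have hx : PySem.List.pyGetD nums (PySem.Int.mod (i : Int) (nums.length : Int)) 0
      = dv nums i := by
    rw [PySem.Int.mod_natCast, PySem.List.pyGetD_natCast]
    rfl
  have hq := bPop_aux nums i hi st res hpw hb h3 hlen hres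
  have hqpw : (bPop nums (dv nums i) st res).1.Pairwise
      (fun a b => b < a ∧ vnum nums a ≤ vnum nums b) := hpw.sublist hq.1
  have hqmem : ∀ j ∈ (bPop nums (dv nums i) st res).1, j ∈ st := fun j hj => hq.1.subset hj
  by_cases hin : i < nums.length
  · have hif : ((i : Int) < (nums.length : Int)) := by exact_mod_cast hin
    simp only [bStep, hx, if_pos hif]
    have hvi : vnum nums (i : Int) = dv nums i := by
      simp [vnum, dv, Nat.mod_eq_of_lt hin]
    refine ⟨hq.2.2.1, ?_, ?_, ?_, ?_⟩
    · refine List.pairwise_cons.mpr ⟨?_, hqpw⟩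
      intro b hbmem
      have hbst := hqmem b hbmem
      have hbb := hb b hbst
      have hbv := hq.2.1 b hbmem
      constructor
      · omega
      · rw [hvi]; omega
    · intro j hj
      rcases List.mem_cons.mp hj with rfl | hj'
      · constructor
        · omega
        · have : i < min (i + 1) nums.length := by omega
          exact_mod_cast this
      · have := hb j (hqmem j hj')
        have hle : ((min i nums.length : Nat) : Int) ≤ ((min (i + 1) nums.length : Nat) : Int) := by
          have : min i nums.length ≤ min (i + 1) nums.length := by omega
          exact_mod_cast this
        exact ⟨this.1, by omega⟩
    · intro j hj k hk1 hk2
      rcases List.mem_cons.mp hj with rfl | hj'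
      · have : (i : Int) < (k : Int) := hk1
        have : i < k := by exact_mod_cast this
        omega
      · by_cases hki : k < i
        · exact h3 j (hqmem j hj') k hk1 hki
        · have : k = i := by omega
          subst this
          exact hq.2.1 j hj'
    · intro jn hjnlt
      constructor
      · intro hcase
        refine (hq.2.2.2 jn hjnlt).1 ?_
        rcases hcase with hmem | hile
        · rcases List.mem_cons.mp hmem with heq | hmem'
          · have : jn = i := by exact_mod_cast heq
            omega
          · exact Or.inl hmem'
        · omega
      · intro ⟨hnmem, hjni⟩
        have hne : jn ≠ i := by
          intro hh
          exact hnmem (by rw [hh]; exact List.mem_cons_self)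
        refine (hq.2.2.2 jn hjnlt).2 ⟨?_, by omega⟩
        intro hmem
        exact hnmem (List.mem_cons_of_mem _ hmem)
  · have hif : ¬ ((i : Int) < (nums.length : Int)) := by exact_mod_cast hin
    simp only [bStep, hx, if_neg hif]
    refine ⟨hq.2.2.1, hqpw, ?_, ?_, ?_⟩
    · intro j hj
      have := hb j (hqmem j hj)
      have hle : ((min i nums.length : Nat) : Int) ≤ ((min (i + 1) nums.length : Nat) : Int) := by
        have : min i nums.length ≤ min (i + 1) nums.length := by omega
        exact_mod_cast this
      exact ⟨this.1, by omega⟩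
    · intro j hj k hk1 hk2
      by_cases hki : k < i
      · exact h3 j (hqmem j hj) k hk1 hki
      · have : k = i := by omega
        subst this
        exact hq.2.1 j hj
    · intro jn hjnlt
      constructor
      · intro hcase
        refine (hq.2.2.2 jn hjnlt).1 ?_
        rcases hcase with hmem | hile
        · exact Or.inl hmem
        · exact Or.inr (by omega)
      · intro ⟨hnmem, _⟩
        exact (hq.2.2.2 jn hjnlt).2 ⟨hnmem, by omega⟩

lemma binv_zero (nums : List Int) : BInv nums 0 [] (List.replicate nums.length (-1)) := by
  refine ⟨by simp, by simp, by simp, by simp, ?_⟩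
  intro jn hjn
  constructor
  · intro _
    rw [List.getD_eq_getElem _ 0 (by simpa using hjn)]
    simp
  · intro h
    omega

lemma loop_inv (nums : List Int) : ∀ m, m ≤ 2 * nums.length →
    BInv nums m
      (((List.range m).map (fun (k : Nat) => (k : Int))).foldl (bStep nums)
        ([], List.replicate nums.length (-1))).1
      (((List.range m).map (fun (k : Nat) => (k : Int))).foldl (bStep nums)
        ([], List.replicate nums.length (-1))).2 := by
  intro m
  induction m with
  | zero => intro _; simpa using binv_zero nums
  | succ m ih =>
    intro hm
    rw [List.range_succ, List.map_append, List.foldl_append]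
    simp only [List.map_cons, List.map_nil, List.foldl_cons, List.foldl_nil]
    have h := step_inv nums m (by omega) _ _ (ih (by omega))
    exact h

lemma solution_alt_eq_spec (nums : List Int) :
    solution_alt nums = (List.range nums.length).map (specA nums) := by
  have hrange : PySem.List.pyRange 0 (2 * (nums.length : Int)) 1
      = (List.range (2 * nums.length)).map (fun (k : Nat) => (k : Int)) := by
    rw [PySem.List.pyRange_one]
    have h1 : ((2 * (nums.length : Int)) - 0).toNat = 2 * nums.length := by omega
    rw [h1]
    exact List.map_congr_left (fun k _ => by omega)
  unfold solution_alt
  rw [hrange]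
  obtain ⟨hlen, hpw, hb, h3, hres⟩ := loop_inv nums (2 * nums.length) le_rfl
  apply List.ext_getElem
  · simp [hlen]
  · intro jn h1 h2
    have hjn : jn < nums.length := by simpa using h2
    simp only [List.getElem_map, List.getElem_range]
    rw [← List.getD_eq_getElem _ 0 h1]
    by_cases hmem : ((jn : Int)) ∈ (((List.range (2 * nums.length)).map
        (fun (k : Nat) => (k : Int))).foldl (bStep nums)
        ([], List.replicate nums.length (-1))).1
    · have H : ∀ k, jn < k → k < 2 * nums.length → ¬ nums.getD jn 0 < dv nums k := by
        intro k hk1 hk2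
        have := h3 _ hmem k (by exact_mod_cast hk1) hk2
        simpa [vnum] using this
      rw [(hres jn hjn).1 (Or.inl hmem), specA_none nums jn hjn H]
    · rw [(hres jn hjn).2 ⟨hmem, by omega⟩]

-- ===== VERDICT (by name: the statement is the Claim_ definition above) =====
theorem solution_spec : Claim_equal_solution := by
  intro nums _
  unfold Spec_solution
  rw [solution_eq_spec, solution_alt_eq_spec]
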